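-- pv_equiv track=rewrite | github.com/BigForLy/FormulaCommit | FormulaCommit/test3.py | parse
-- ===== SOURCE A (Python) =====
-- OPERATORS = {'+': (1, lambda x, y: x + y), '-': (1, lambda x, y: x - y),
--              '*': (2, lambda x, y: x * y), '/': (2, lambda x, y: x / y)}
--
-- def parse(formula_string):
--     param = ''
--     for s in formula_string:
--         if s in OPERATORS or s in "( ,)":  # garbage
--             if param:
--                 yield param
--             yield s
--             param = ''
--         else:
--             param += s
--     if param:
--         yield param
-- ===== SOURCE B (Python) =====
-- OPERATORS = {'+': (1, lambda x, y: x + y), '-': (1, lambda x, y: x - y),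
--              '*': (2, lambda x, y: x * y), '/': (2, lambda x, y: x / y)}
--
-- _DELIMS = set('+-*/( ,)')
--
-- def parse(formula_string):
--     i = 0
--     n = len(formula_string)
--     while i < n:
--         c = formula_string[i]
--         if c in _DELIMS:
--             yield c
--             i += 1
--         else:
--             j = i + 1
--             while j < n and formula_string[j] not in _DELIMS:
--                 j += 1
--             yield formula_string[i:j]
--             i = j
-- ===== Notes on version B (the rewrite author's own statement) =====
-- stated objective: alternative
-- what changed: Replaces the character-accumulator-with-flush generator by an index-based two-pointer scan that yields each delimiter directly and slices out each maximal run of non-delimiter characters in one step, keeping no accumulated state.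
import Mathlib
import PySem

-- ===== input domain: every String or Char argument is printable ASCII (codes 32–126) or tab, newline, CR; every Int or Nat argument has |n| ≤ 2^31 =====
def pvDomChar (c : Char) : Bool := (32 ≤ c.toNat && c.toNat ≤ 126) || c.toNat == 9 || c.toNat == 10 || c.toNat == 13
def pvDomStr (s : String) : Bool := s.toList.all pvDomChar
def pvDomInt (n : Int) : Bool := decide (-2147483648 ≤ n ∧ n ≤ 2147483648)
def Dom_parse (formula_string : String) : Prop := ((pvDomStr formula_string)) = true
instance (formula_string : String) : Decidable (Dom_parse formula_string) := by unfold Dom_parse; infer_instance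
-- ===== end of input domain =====

-- B replaces A's character-accumulator-with-flush scan by an index/two-pointer scan
-- yielding delimiters directly and slicing maximal non-delimiter runs (objective: alternative).

-- ===== PORT A =====
-- `s in OPERATORS or s in "( ,)"`: membership in the dict's keys or in the string
def pvDelim (c : Char) : Bool :=
  ("+-*/".toList.contains c) || ("( ,)".toList.contains c)

-- the generator's yields collected in order; `param` kept as the accumulated characters
def parse (formula_string : String) : List String :=
  let st := formula_string.toList.foldl
    (fun (acc : List String × List Char) s =>
      if pvDelim s then
        (acc.1 ++ (if acc.2 = [] then [] else [String.mk acc.2]) ++ [String.mk [s]], [])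
      else
        (acc.1, acc.2 ++ [s]))
    ([], [])
  st.1 ++ (if st.2 = [] then [] else [String.mk st.2])

-- ===== PORT B =====
-- two-pointer scan: a delimiter is yielded alone; a non-delimiter starts a maximal run
-- (the slice formula_string[i:j] is c followed by the chars scanned by the inner while)
def parseAltGo : List Char → List String
  | [] => []
  | c :: rest =>
    if pvDelim c then
      String.mk [c] :: parseAltGo rest
    else
      String.mk (c :: rest.takeWhile (fun d => !pvDelim d)) ::
        parseAltGo (rest.dropWhile (fun d => !pvDelim d))
termination_by l => l.length
decreasing_by
  · simp
  · exact Nat.lt_succ_of_le (List.length_dropWhile_le _ _)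

def parse_alt (formula_string : String) : List String :=
  parseAltGo formula_string.toList

-- ===== PRECONDITION & SPEC =====
def Spec_parse (formula_string : String) (out : List String) : Prop := out = parse_alt formula_string
instance (formula_string : String) (out : List String) : Decidable (Spec_parse formula_string out) := by unfold Spec_parse; infer_instance

-- ===== CLAIM (what is proved, stated in full; the proofs are below) =====
def Claim_equal_parse : Prop := ∀ (formula_string : String), Dom_parse formula_string → Spec_parse formula_string (parse formula_string)

-- ===== LEMMAS AND PROOFS =====

-- A's loop as a recursion over the remaining characters and the pending param
def runA : List Char → List Char → List String
  | [], p => if p = [] then [] else [String.mk p]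
  | c :: l, p =>
    if pvDelim c then
      (if p = [] then [] else [String.mk p]) ++ [String.mk [c]] ++ runA l []
    else runA l (p ++ [c])

theorem foldl_eq_runA (l : List Char) (out : List String) (p : List Char) :
    (let st := l.foldl
      (fun (acc : List String × List Char) s =>
        if pvDelim s then
          (acc.1 ++ (if acc.2 = [] then [] else [String.mk acc.2]) ++ [String.mk [s]], [])
        else
          (acc.1, acc.2 ++ [s]))
      (out, p)
     st.1 ++ (if st.2 = [] then [] else [String.mk st.2])) = out ++ runA l p := by
  induction l generalizing out p with
  | nil => simp [runA]
  | cons c l ih =>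
    simp only [List.foldl_cons]
    by_cases h : pvDelim c
    · simp only [h, if_pos, runA, ih]
      simp
    · simp only [h, runA, if_neg, Bool.false_eq_true, not_false_iff, ite_false, ih]

theorem go_flush (r : List Char) :
    parseAltGo r =
      (if r.takeWhile (fun d => !pvDelim d) = [] then []
       else [String.mk (r.takeWhile (fun d => !pvDelim d))]) ++
      parseAltGo (r.dropWhile (fun d => !pvDelim d)) := by
  cases r with
  | nil => simp [parseAltGo]
  | cons c rest =>
    by_cases h : pvDelim c
    · simp [List.takeWhile_cons, List.dropWhile_cons, h]
    · rw [parseAltGo]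
      simp [List.takeWhile_cons, List.dropWhile_cons, h]

theorem runA_eq_go (l : List Char) (p : List Char) :
    runA l p =
      (if p ++ l.takeWhile (fun d => !pvDelim d) = [] then []
       else [String.mk (p ++ l.takeWhile (fun d => !pvDelim d))]) ++
      parseAltGo (l.dropWhile (fun d => !pvDelim d)) := by
  induction l generalizing p with
  | nil => simp [runA, parseAltGo]
  | cons c rest ih =>
    by_cases h : pvDelim c
    · rw [runA, ih []]
      simp only [List.nil_append]
      rw [← go_flush rest]
      simp only [List.takeWhile_cons, List.dropWhile_cons, h, Bool.not_true,
        Bool.false_eq_true, ite_false, List.append_nil]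
      rw [show parseAltGo (c :: rest) = String.mk [c] :: parseAltGo rest from by
        rw [parseAltGo]; simp [h]]
      simp
    · rw [runA]
      simp only [h, Bool.false_eq_true, ite_false, ih (p ++ [c])]
      simp [List.takeWhile_cons, List.dropWhile_cons, h]

-- ===== VERDICT (by name: the statement is the Claim_ definition above) =====
theorem parse_spec : Claim_equal_parse := by
  intro fs _
  unfold Spec_parse parse parse_alt
  rw [foldl_eq_runA fs.toList [] [], runA_eq_go fs.toList []]
  simp [go_flush fs.toList]
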